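-- pv_equiv track=rewrite | github.com/deepbuilder/minichat | minichat/core_eval.py | find_common_length
-- ===== SOURCE A (Python) =====
-- def find_common_length(sequences, direction='prefix'):
--     if direction == 'prefix':
--         min_len = min(len(seq) for seq in sequences)
--         common_len = 0
--         for i in range(min_len):
--             token = sequences[0][i]
--             if all(seq[i] == token for seq in sequences):
--                 common_len += 1
--             else:
--                 break
--         return common_len
--     elif direction == 'suffix':
--         min_len = min(len(seq) for seq in sequences)
--         common_len = 0
--         for i in range(1, min_len + 1):
--             token = sequences[0][-i]
--             if all(seq[-i] == token for seq in sequences):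
--                 common_len += 1
--             else:
--                 break
--         return common_len
--     else:
--         raise ValueError("direction must be 'prefix' or 'suffix'")
-- ===== SOURCE B (Python) =====
-- def _lcp(a, b):
--     """Longest common prefix of two lists."""
--     out = []
--     for x, y in zip(a, b):
--         if x != y:
--             break
--         out.append(x)
--     return out
--
--
-- def find_common_length(sequences, direction='prefix'):
--     if direction == 'prefix':
--         views = [list(s) for s in sequences]
--     elif direction == 'suffix':
--         views = [list(reversed(s)) for s in sequences]
--     else:
--         raise ValueError("direction must be 'prefix' or 'suffix'")
--     cand = views[0]
--     for s in views[1:]: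
--         cand = _lcp(cand, s)
--     return len(cand)
-- ===== Notes on version B (the rewrite author's own statement) =====
-- stated objective: alternative
-- what changed: Replaces A's column-by-column scan over all sequences at once by a pairwise left fold that narrows a running common-prefix candidate sequence by sequence (suffix handled by reversing each sequence), returning the candidate's length.
import Mathlib
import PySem

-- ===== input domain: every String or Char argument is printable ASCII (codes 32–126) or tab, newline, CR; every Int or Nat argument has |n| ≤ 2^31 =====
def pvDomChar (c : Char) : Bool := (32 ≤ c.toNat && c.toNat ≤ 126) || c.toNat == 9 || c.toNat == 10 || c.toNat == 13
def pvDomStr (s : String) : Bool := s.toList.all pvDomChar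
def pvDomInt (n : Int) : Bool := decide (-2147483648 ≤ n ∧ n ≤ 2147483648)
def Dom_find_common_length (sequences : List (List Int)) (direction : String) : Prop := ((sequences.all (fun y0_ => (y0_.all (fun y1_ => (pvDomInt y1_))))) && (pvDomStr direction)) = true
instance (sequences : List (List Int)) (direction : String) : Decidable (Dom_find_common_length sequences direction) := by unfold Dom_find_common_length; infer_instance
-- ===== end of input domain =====

-- B narrows a running common-prefix candidate sequence by sequence (suffix via reversing)
-- instead of A's simultaneous column scan; same cost, different decomposition.

-- ===== PORT A =====
-- min(len(seq) for seq in sequences); Python raises ValueError on [], excluded by Pre_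
def pvMinLen (seqs : List (List Int)) : Nat :=
  match seqs with
  | [] => 0
  | s :: rest => rest.foldl (fun m t => min m t.length) s.length

-- the prefix loop: for i in range(min_len) with break; getD 0 only totalizes valid indexing
def aPrefixGo (seqs : List (List Int)) (i : Nat) (rem : Nat) (acc : Int) : Int :=
  match rem with
  | 0 => acc
  | rem' + 1 =>
    let token := (PySem.List.pyGet? (seqs.headD []) (i : Int)).getD 0
    if seqs.all (fun s => (PySem.List.pyGet? s (i : Int)).getD 0 == token)
    then aPrefixGo seqs (i + 1) rem' (acc + 1)
    else acc

-- the suffix loop: for i in range(1, min_len+1) with break, negative indexing seq[-i]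
def aSuffixGo (seqs : List (List Int)) (i : Nat) (rem : Nat) (acc : Int) : Int :=
  match rem with
  | 0 => acc
  | rem' + 1 =>
    let token := (PySem.List.pyGet? (seqs.headD []) (-(i : Int))).getD 0
    if seqs.all (fun s => (PySem.List.pyGet? s (-(i : Int))).getD 0 == token)
    then aSuffixGo seqs (i + 1) rem' (acc + 1)
    else acc

def find_common_length (sequences : List (List Int)) (direction : String) : Int :=
  if direction == "prefix" then
    aPrefixGo sequences 0 (pvMinLen sequences) 0
  else if direction == "suffix" then
    aSuffixGo sequences 1 (pvMinLen sequences) 0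
  else 0  -- Python raises ValueError here, excluded by Pre_

-- ===== PORT B =====
-- _lcp: for x, y in zip(a, b): if x != y: break; out.append(x)
def lcpBgo : List (Int × Int) → List Int → List Int
  | [], out => out
  | (x, y) :: rest, out => if x != y then out else lcpBgo rest (out ++ [x])

def lcpB (a b : List Int) : List Int := lcpBgo (a.zip b) []

def find_common_length_alt (sequences : List (List Int)) (direction : String) : Int :=
  if direction == "prefix" then
    match sequences.map (fun s => s) with
    | [] => 0  -- Python raises IndexError (views[0]) here, excluded by Pre_
    | c :: rest => ((rest.foldl lcpB c).length : Int)
  else if direction == "suffix" then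
    match sequences.map List.reverse with
    | [] => 0
    | c :: rest => ((rest.foldl lcpB c).length : Int)
  else 0  -- Python raises ValueError here, excluded by Pre_

-- ===== PRECONDITION & SPEC =====
-- Pre_ excludes only inputs where A raises: empty `sequences` (ValueError from min())
-- and a direction other than 'prefix'/'suffix' (explicit ValueError).
def Pre_find_common_length (sequences : List (List Int)) (direction : String) : Prop :=
  sequences ≠ [] ∧ (direction = "prefix" ∨ direction = "suffix")
instance (sequences : List (List Int)) (direction : String) : Decidable (Pre_find_common_length sequences direction) := by unfold Pre_find_common_length; infer_instance
def pvWitness_find_common_length : List (List Int) × String := ([[1, 2, 3], [1, 2, 4]], "prefix")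

def Spec_find_common_length (sequences : List (List Int)) (direction : String) (out : Int) : Prop := out = find_common_length_alt sequences direction
instance (sequences : List (List Int)) (direction : String) (out : Int) : Decidable (Spec_find_common_length sequences direction out) := by unfold Spec_find_common_length; infer_instance

-- ===== CLAIM (what is proved, stated in full; the proofs are below) =====
def Claim_equal_find_common_length : Prop := ∀ (sequences : List (List Int)) (direction : String), Dom_find_common_length sequences direction → Pre_find_common_length sequences direction → Spec_find_common_length sequences direction (find_common_length sequences direction)

-- ===== LEMMAS AND PROOFS =====

-- mathematical longest common prefix
def lcpM : List Int → List Int → List Int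
  | x :: xs, y :: ys => if x = y then x :: lcpM xs ys else []
  | _, _ => []

theorem lcpBgo_eq (a : List Int) : ∀ (b out : List Int), lcpBgo (a.zip b) out = out ++ lcpM a b := by
  induction a with
  | nil => intro b out; simp [lcpBgo, lcpM]
  | cons x xs ih =>
    intro b out
    cases b with
    | nil => simp [lcpBgo, lcpM]
    | cons y ys =>
      by_cases hxy : x = y
      · simp [lcpBgo, lcpM, hxy, ih]
      · simp [lcpBgo, lcpM, hxy]

theorem lcpB_eq_lcpM : lcpB = lcpM := by
  funext a b; simp [lcpB, lcpBgo_eq]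

theorem lcpM_prefix_left (a : List Int) : ∀ b, lcpM a b <+: a := by
  induction a with
  | nil => intro b; cases b <;> simp [lcpM]
  | cons x xs ih =>
    intro b
    cases b with
    | nil => simp [lcpM]
    | cons y ys =>
      by_cases hxy : x = y
      · simpa [lcpM, hxy] using ih ys
      · simp [lcpM, hxy]

theorem lcpM_prefix_right (a : List Int) : ∀ b, lcpM a b <+: b := by
  induction a with
  | nil => intro b; cases b <;> simp [lcpM]
  | cons x xs ih =>
    intro b
    cases b with
    | nil => simp [lcpM]
    | cons y ys =>
      by_cases hxy : x = y
      · subst hxy; simpa [lcpM] using ih ys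
      · simp [lcpM, hxy]

theorem prefix_getElem? {l₁ l₂ : List Int} (h : l₁ <+: l₂) {i : Nat} (hi : i < l₁.length) :
    l₂[i]? = l₁[i]? := by
  obtain ⟨r, rfl⟩ := h
  rw [List.getElem?_append_left hi]

theorem lcpM_max (a : List Int) : ∀ (b : List Int) (k : Nat), k ≤ a.length → k ≤ b.length →
    (∀ i, i < k → a[i]? = b[i]?) → k ≤ (lcpM a b).length := by
  induction a with
  | nil =>
    intro b k hk _ _
    have : k = 0 := by simpa using hk
    subst this; simp
  | cons x xs ih =>
    intro b k hk hkb hag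
    cases b with
    | nil =>
      have : k = 0 := by simpa using hkb
      subst this; simp
    | cons y ys =>
      cases k with
      | zero => simp
      | succ k' =>
        have h0 := hag 0 (Nat.succ_pos _)
        simp at h0
        subst h0
        have := ih ys k' (by simpa using hk) (by simpa using hkb)
          (fun i hi => by simpa using hag (i + 1) (by omega))
        simp [lcpM]
        omega

theorem foldl_lcp_prefix (t : List (List Int)) : ∀ (w s : List Int), (s = w ∨ s ∈ t) →
    t.foldl lcpM w <+: s := by
  induction t with
  | nil =>
    rintro w s (rfl | hs)
    · simp
    · simp at hs
  | cons u t' ih =>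
    rintro w s (rfl | hs)
    · exact (ih (lcpM s u) _ (Or.inl rfl)).trans (lcpM_prefix_left s u)
    · rcases List.mem_cons.mp hs with rfl | hs'
      · exact (ih (lcpM w s) _ (Or.inl rfl)).trans (lcpM_prefix_right w s)
      · exact ih (lcpM w u) s (Or.inr hs')

theorem foldl_lcp_max (t : List (List Int)) : ∀ (w : List Int) (k : Nat), k ≤ w.length →
    (∀ s, s ∈ t → k ≤ s.length ∧ ∀ i, i < k → s[i]? = w[i]?) → k ≤ (t.foldl lcpM w).length := by
  induction t with
  | nil => intro w k hk _; simpa using hk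
  | cons u t' ih =>
    intro w k hk hall
    obtain ⟨hul, huag⟩ := hall u (by simp)
    have hk' : k ≤ (lcpM w u).length :=
      lcpM_max w u k hk hul (fun i hi => (huag i hi).symm)
    refine ih (lcpM w u) k hk' (fun s hs => ?_)
    obtain ⟨hsl, hsag⟩ := hall s (by simp [hs])
    refine ⟨hsl, fun i hi => ?_⟩
    rw [hsag i hi, prefix_getElem? (lcpM_prefix_left w u) (by omega)]

-- pvMinLen bounds
theorem foldl_min_le (t : List (List Int)) : ∀ (a : Nat),
    t.foldl (fun m s => min m s.length) a ≤ a ∧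
    ∀ s ∈ t, t.foldl (fun m s => min m s.length) a ≤ s.length := by
  induction t with
  | nil => intro a; simp
  | cons u t' ih =>
    intro a
    obtain ⟨h1, h2⟩ := ih (min a u.length)
    refine ⟨h1.trans (by omega), fun s hs => ?_⟩
    rcases List.mem_cons.mp hs with rfl | hs'
    · exact h1.trans (by omega)
    · exact h2 s hs'

theorem le_foldl_min (t : List (List Int)) : ∀ (a k : Nat), k ≤ a → (∀ s ∈ t, k ≤ s.length) →
    k ≤ t.foldl (fun m s => min m s.length) a := by
  induction t with
  | nil => intro a k hk _; simpa using hk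
  | cons u t' ih =>
    intro a k hk hall
    have hu : k ≤ u.length := hall u (by simp)
    exact ih (min a u.length) k (by simp; omega) (fun s hs => hall s (by simp [hs]))

theorem pvMinLen_le (h : List Int) (t : List (List Int)) :
    ∀ s ∈ h :: t, pvMinLen (h :: t) ≤ s.length := by
  intro s hs
  rcases List.mem_cons.mp hs with rfl | hs'
  · exact (foldl_min_le t s.length).1
  · exact (foldl_min_le t h.length).2 s hs'

theorem le_pvMinLen (h : List Int) (t : List (List Int)) (k : Nat)
    (hall : ∀ s ∈ h :: t, k ≤ s.length) : k ≤ pvMinLen (h :: t) :=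
  le_foldl_min t h.length k (hall h (by simp)) (fun s hs => hall s (by simp [hs]))

theorem getD_pyGet?_nat (s : List Int) (i : Nat) (hi : i < s.length) :
    (PySem.List.pyGet? s (i : Int)).getD 0 = s[i] := by
  simp [PySem.List.pyGet?_natCast, List.getElem?_eq_getElem hi]

theorem pyGet?_neg_rev (s : List Int) (j : Nat) (hj : j + 1 ≤ s.length) :
    PySem.List.pyGet? s (-((j + 1 : Nat) : Int)) = s.reverse[j]? := by
  rw [PySem.List.pyGet?_neg_natCast s (j + 1) (by omega) hj]
  rw [List.getElem?_reverse (by omega)]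
  congr 1
  omega

theorem aPrefixGo_eq (h : List Int) (t : List (List Int)) :
    ∀ (rem i : Nat) (acc : Int), i + rem = pvMinLen (h :: t) →
    i ≤ (t.foldl lcpM h).length →
    aPrefixGo (h :: t) i rem acc = acc + (((t.foldl lcpM h).length - i : Nat) : Int) := by
  set L := t.foldl lcpM h with hL
  set n := L.length with hn
  have hnle : n ≤ pvMinLen (h :: t) := by
    refine le_pvMinLen h t n (fun s hs => ?_)
    exact ((foldl_lcp_prefix t h s (List.mem_cons.mp hs)).length_le)
  have hag : ∀ s ∈ h :: t, ∀ i, i < n → s[i]? = h[i]? := by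
    intro s hs i hi
    have h1 : s[i]? = L[i]? :=
      prefix_getElem? (foldl_lcp_prefix t h s (List.mem_cons.mp hs)) hi
    have h2 : h[i]? = L[i]? := prefix_getElem? (foldl_lcp_prefix t h h (Or.inl rfl)) hi
    rw [h1, h2]
  intro rem
  induction rem with
  | zero =>
    intro i acc hsum hile
    have : n = i := by omega
    simp [aPrefixGo, this]
  | succ rem' ih =>
    intro i acc hsum hile
    have himl : i < pvMinLen (h :: t) := by omega
    have hih : i < h.length := lt_of_lt_of_le himl (pvMinLen_le h t h (by simp))
    rw [aPrefixGo]
    simp only [List.headD_cons]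
    simp only [getD_pyGet?_nat h i hih]
    by_cases hin : i < n
    · have hcond : (h :: t).all (fun s => (PySem.List.pyGet? s (i : Int)).getD 0 == h[i]) = true := by
        rw [List.all_eq_true]
        intro s hs
        have his : i < s.length := lt_of_lt_of_le himl (pvMinLen_le h t s hs)
        rw [getD_pyGet?_nat s i his]
        have := hag s hs i hin
        rw [List.getElem?_eq_getElem his, List.getElem?_eq_getElem hih] at this
        simp at this ⊢
        exact this
      rw [if_pos hcond]
      rw [ih (i + 1) (acc + 1) (by omega) (by omega)]
      push_cast [Nat.sub_add_eq]
      omega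
    · have hieq : i = n := by omega
      have hex : ∃ s ∈ h :: t, s[i]? ≠ h[i]? := by
        by_contra hcon
        push Not at hcon
        have : i + 1 ≤ n := by
          refine foldl_lcp_max t h (i + 1) (by omega) (fun s hs => ?_)
          refine ⟨le_trans (by omega) (pvMinLen_le h t s (by simp [hs])), fun j hj => ?_⟩
          rcases Nat.lt_or_ge j i with hji | hji
          · exact hag s (by simp [hs]) j (by omega)
          · have : j = i := by omega
            subst this
            exact hcon s (by simp [hs])
        omega
      obtain ⟨s, hs, hne⟩ := hex
      have his : i < s.length := lt_of_lt_of_le himl (pvMinLen_le h t s hs)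
      have hcond : (h :: t).all (fun s => (PySem.List.pyGet? s (i : Int)).getD 0 == h[i]) = false := by
        rw [List.all_eq_false]
        refine ⟨s, hs, ?_⟩
        rw [getD_pyGet?_nat s i his]
        rw [List.getElem?_eq_getElem his, List.getElem?_eq_getElem hih] at hne
        simp at hne ⊢
        exact hne
      rw [if_neg (by rw [hcond]; simp)]
      have : n - i = 0 := by omega
      simp [this]

theorem aSuffixGo_eq (h : List Int) (t : List (List Int)) :
    ∀ (rem j : Nat) (acc : Int), (j + 1) + rem = pvMinLen (h :: t) + 1 →
    j ≤ ((t.map List.reverse).foldl lcpM h.reverse).length →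
    aSuffixGo (h :: t) (j + 1) rem acc =
      acc + ((((t.map List.reverse).foldl lcpM h.reverse).length - j : Nat) : Int) := by
  set L := (t.map List.reverse).foldl lcpM h.reverse with hL
  set n := L.length with hn
  have hpref : ∀ s, (s = h ∨ s ∈ t) → L <+: s.reverse := by
    intro s hs
    refine foldl_lcp_prefix (t.map List.reverse) h.reverse s.reverse ?_
    rcases hs with rfl | hs'
    · exact Or.inl rfl
    · exact Or.inr (List.mem_map_of_mem hs')
  have hnle : n ≤ pvMinLen (h :: t) := by
    refine le_pvMinLen h t n (fun s hs => ?_)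
    have := (hpref s (List.mem_cons.mp hs)).length_le
    simpa using this
  have hag : ∀ s ∈ h :: t, ∀ j, j < n → s.reverse[j]? = h.reverse[j]? := by
    intro s hs j hj
    have h1 : s.reverse[j]? = L[j]? :=
      prefix_getElem? (hpref s (List.mem_cons.mp hs)) hj
    have h2 : h.reverse[j]? = L[j]? := prefix_getElem? (hpref h (Or.inl rfl)) hj
    rw [h1, h2]
  intro rem
  induction rem with
  | zero =>
    intro j acc hsum hjle
    have : n = j := by omega
    simp [aSuffixGo, this]
  | succ rem' ih =>
    intro j acc hsum hjle
    have hjml : j < pvMinLen (h :: t) := by omega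
    have hjh : j + 1 ≤ h.length := le_trans (by omega) (pvMinLen_le h t h (by simp))
    have hjhr : j < h.reverse.length := by simpa using hjh
    rw [aSuffixGo]
    simp only [List.headD_cons]
    simp only [pyGet?_neg_rev h j hjh, List.getElem?_eq_getElem hjhr, Option.getD_some]
    by_cases hjn : j < n
    · have hcond : (h :: t).all (fun s => (PySem.List.pyGet? s (-(((j : Nat) + 1 : Nat) : Int))).getD 0 == h.reverse[j]) = true := by
        rw [List.all_eq_true]
        intro s hs
        have hjs : j + 1 ≤ s.length := le_trans (by omega) (pvMinLen_le h t s hs)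
        rw [pyGet?_neg_rev s j hjs]
        have hsome : s.reverse[j]? = some h.reverse[j] := by
          rw [hag s hs j hjn, List.getElem?_eq_getElem hjhr]
        rw [hsome]
        simp
      rw [if_pos hcond]
      have := ih (j + 1) (acc + 1) (by omega) (by omega)
      rw [show j + 1 + 1 = (j + 1) + 1 from rfl] at this
      rw [this]
      push_cast [Nat.sub_add_eq]
      omega
    · have hjeq : j = n := by omega
      have hex : ∃ s ∈ h :: t, s.reverse[j]? ≠ h.reverse[j]? := by
        by_contra hcon
        push Not at hcon
        have : j + 1 ≤ n := by
          refine foldl_lcp_max (t.map List.reverse) h.reverse (j + 1) (by simpa using hjh) (fun rs hrs => ?_)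
          obtain ⟨s, hst, rfl⟩ := List.mem_map.mp hrs
          refine ⟨by simpa using le_trans (by omega) (pvMinLen_le h t s (by simp [hst])), fun i hi => ?_⟩
          rcases Nat.lt_or_ge i j with hij | hij
          · exact hag s (by simp [hst]) i (by omega)
          · have : i = j := by omega
            subst this
            exact hcon s (by simp [hst])
        omega
      obtain ⟨s, hs, hne⟩ := hex
      have hjs : j + 1 ≤ s.length := le_trans (by omega) (pvMinLen_le h t s hs)
      have hcond : (h :: t).all (fun s => (PySem.List.pyGet? s (-(((j : Nat) + 1 : Nat) : Int))).getD 0 == h.reverse[j]) = false := by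
        rw [List.all_eq_false]
        refine ⟨s, hs, ?_⟩
        rw [pyGet?_neg_rev s j hjs]
        have hjsr : j < s.reverse.length := by simpa using hjs
        rw [List.getElem?_eq_getElem hjsr, List.getElem?_eq_getElem hjhr] at hne
        rw [List.getElem?_eq_getElem hjsr]
        simp only [Option.getD_some, beq_iff_eq]
        exact fun e => hne (congrArg some e)
      rw [if_neg (by rw [hcond]; simp)]
      have : n - j = 0 := by omega
      simp [this]

-- ===== VERDICT (by name: the statement is the Claim_ definition above) =====
theorem find_common_length_spec : Claim_equal_find_common_length := by
  intro sequences direction _ hpre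
  obtain ⟨hne, hdir⟩ := hpre
  obtain ⟨h, t, rfl⟩ : ∃ h t, sequences = h :: t := by
    cases sequences with
    | nil => exact absurd rfl hne
    | cons h t => exact ⟨h, t, rfl⟩
  show find_common_length (h :: t) direction = find_common_length_alt (h :: t) direction
  rcases hdir with rfl | rfl
  · rw [find_common_length, find_common_length_alt]
    simp only [List.map_id_fun', id]
    rw [aPrefixGo_eq h t (pvMinLen (h :: t)) 0 0 (by omega) (Nat.zero_le _)]
    rw [lcpB_eq_lcpM]
    simp
  · rw [find_common_length, find_common_length_alt]
    norm_num
    rw [aSuffixGo_eq h t (pvMinLen (h :: t)) 0 0 (by omega) (Nat.zero_le _)]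
    rw [lcpB_eq_lcpM]
    simp
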